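-- pv_equiv track=rewrite | github.com/simranjmodi/cracking-the-coding-interview-in-python | chapter-08/exercise-8.5.3.py | min_product_helper
-- ===== SOURCE A (Python) =====
-- def min_product_helper(smaller, bigger):
--     if smaller == 0:
--         return 0
--     elif smaller == 1:
--         return bigger
--
--     s = smaller >> 1 # divide by 2
--     half_prod = min_product_helper(s, bigger)
--
--     if smaller % 2 == 0:
--         return half_prod + half_prod
--     else:
--         return half_prod + half_prod + bigger
-- ===== SOURCE B (Python) =====
-- def min_product_helper(smaller, bigger):
--     if smaller == 0:
--         return 0
--     result = 0
--     addend = bigger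
--     s = smaller
--     while s > 1:
--         if s % 2 == 1:
--             result += addend
--         addend += addend
--         s >>= 1
--     return result + addend
-- ===== Notes on version B (the rewrite author's own statement) =====
-- stated objective: alternative
-- what changed: Replaces the recursion over halved 'smaller' with an iterative shift-and-add loop that accumulates doubled addends into a running result.
import Mathlib
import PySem

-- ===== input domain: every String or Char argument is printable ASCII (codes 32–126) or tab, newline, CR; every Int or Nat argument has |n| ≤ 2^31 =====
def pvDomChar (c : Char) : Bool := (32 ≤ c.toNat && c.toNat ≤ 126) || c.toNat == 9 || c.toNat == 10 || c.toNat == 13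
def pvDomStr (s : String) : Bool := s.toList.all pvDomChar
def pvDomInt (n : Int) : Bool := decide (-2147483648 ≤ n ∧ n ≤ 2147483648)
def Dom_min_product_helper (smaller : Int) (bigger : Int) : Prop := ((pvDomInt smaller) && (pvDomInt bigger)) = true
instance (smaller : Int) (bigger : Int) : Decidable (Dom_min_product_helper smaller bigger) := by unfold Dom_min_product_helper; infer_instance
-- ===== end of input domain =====

-- B replaces A's recursion with an iterative shift-and-add loop (alternative decomposition, same cost).

-- ===== PORT A =====
-- A's recursion on 'smaller >> 1' does not terminate for negative smaller (excluded by Pre_);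
-- the fuel is a pure totality guard: it is never exhausted when 0 ≤ smaller (proved below).
def min_product_helper_go (fuel : Nat) (smaller : Int) (bigger : Int) : Int :=
  match fuel with
  | 0 => 0
  | fuel + 1 =>
    if smaller = 0 then 0
    else if smaller = 1 then bigger
    else
      let s := PySem.Int.floordiv smaller 2
      let half_prod := min_product_helper_go fuel s bigger
      if PySem.Int.mod smaller 2 = 0 then half_prod + half_prod
      else half_prod + half_prod + bigger

def min_product_helper (smaller : Int) (bigger : Int) : Int :=
  min_product_helper_go (smaller.toNat + 1) smaller bigger

-- ===== PORT B =====
def min_product_helper_alt_go (result : Int) (addend : Int) (s : Int) : Int :=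
  if _h : 1 < s then
    min_product_helper_alt_go (if PySem.Int.mod s 2 = 1 then result + addend else result)
      (addend + addend) (PySem.Int.floordiv s 2)
  else result + addend
termination_by s.toNat
decreasing_by
  have := PySem.Int.floordiv_eq_ediv_of_pos (a := s) (b := 2) (by omega)
  omega

def min_product_helper_alt (smaller : Int) (bigger : Int) : Int :=
  if smaller = 0 then 0
  else min_product_helper_alt_go 0 bigger smaller

-- ===== PRECONDITION & SPEC =====
-- Pre_ excludes negative smaller, on which Python A recurses forever on smaller >> 1 (RecursionError).
def Pre_min_product_helper (smaller : Int) (bigger : Int) : Prop := 0 ≤ smaller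
instance (smaller : Int) (bigger : Int) : Decidable (Pre_min_product_helper smaller bigger) := by
  unfold Pre_min_product_helper; infer_instance

def pvWitness_min_product_helper : Int × Int := (13, -7)

def Spec_min_product_helper (smaller : Int) (bigger : Int) (out : Int) : Prop := out = min_product_helper_alt smaller bigger
instance (smaller : Int) (bigger : Int) (out : Int) : Decidable (Spec_min_product_helper smaller bigger out) := by unfold Spec_min_product_helper; infer_instance

-- ===== CLAIM (what is proved, stated in full; the proofs are below) =====
def Claim_equal_min_product_helper : Prop := ∀ (smaller : Int) (bigger : Int), Dom_min_product_helper smaller bigger → Pre_min_product_helper smaller bigger → Spec_min_product_helper smaller bigger (min_product_helper smaller bigger)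

-- ===== LEMMAS AND PROOFS =====

-- A computes smaller * bigger when the fuel bounds smaller from above.
theorem min_product_helper_go_eq (fuel : Nat) (smaller bigger : Int)
    (h0 : 0 ≤ smaller) (hf : smaller ≤ (fuel : Int)) :
    min_product_helper_go fuel smaller bigger = smaller * bigger := by
  induction fuel generalizing smaller with
  | zero =>
    have : smaller = 0 := by omega
    simp [min_product_helper_go, this]
  | succ n ih =>
    rw [min_product_helper_go]
    by_cases h1 : smaller = 0
    · simp [h1]
    · by_cases h2 : smaller = 1
      · simp [h2]
      · have hfd : PySem.Int.floordiv smaller 2 = smaller / 2 :=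
          PySem.Int.floordiv_eq_ediv_of_pos (by omega)
        have hmd : PySem.Int.mod smaller 2 = smaller % 2 :=
          PySem.Int.mod_eq_emod_of_pos (by omega)
        have hrec : min_product_helper_go n (smaller / 2) bigger = (smaller / 2) * bigger :=
          ih (smaller / 2) (by omega) (by omega)
        simp only [h1, h2, if_false, hfd, hmd, hrec]
        by_cases hp : smaller % 2 = 0
        · have hq : smaller = 2 * (smaller / 2) := by omega
          simp only [hp, if_true]
          linear_combination (-bigger) * hq
        · have hq : smaller = 2 * (smaller / 2) + 1 := by omega
          simp only [hp, if_false]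
          linear_combination (-bigger) * hq

-- B's loop invariant: it returns result + s * addend for positive s.
theorem min_product_helper_alt_go_eq (n : Nat) (s result addend : Int)
    (hn : s.toNat ≤ n) (hs : 1 ≤ s) :
    min_product_helper_alt_go result addend s = result + s * addend := by
  induction n generalizing s result addend with
  | zero => omega
  | succ n ih =>
    rw [min_product_helper_alt_go]
    by_cases h : 1 < s
    · have hfd : PySem.Int.floordiv s 2 = s / 2 :=
        PySem.Int.floordiv_eq_ediv_of_pos (by omega)
      have hmd : PySem.Int.mod s 2 = s % 2 :=
        PySem.Int.mod_eq_emod_of_pos (by omega)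
      have hrec := fun r a => ih (s / 2) r a (by omega) (by omega)
      simp only [h, dif_pos, hfd, hmd, hrec]
      by_cases hp : s % 2 = 1
      · have hq : s = 2 * (s / 2) + 1 := by omega
        rw [if_pos hp]
        linear_combination (-addend) * hq
      · have hq : s = 2 * (s / 2) := by omega
        rw [if_neg hp]
        linear_combination (-addend) * hq
    · have h1 : s = 1 := by omega
      simp [h1]

-- ===== VERDICT (by name: the statement is the Claim_ definition above) =====
theorem min_product_helper_spec : Claim_equal_min_product_helper := by
  intro smaller bigger _ hpre
  have hpos : 0 ≤ smaller := hpre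
  unfold Spec_min_product_helper min_product_helper min_product_helper_alt
  rw [min_product_helper_go_eq (smaller.toNat + 1) smaller bigger hpos (by omega)]
  by_cases h0 : smaller = 0
  · simp [h0]
  · rw [if_neg h0, min_product_helper_alt_go_eq smaller.toNat smaller 0 bigger (by omega) (by omega)]
    ring
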